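-- pv_equiv track=rewrite | github.com/ParkSanggi/algorithm_study | greedy/remove_numbers.py | solution
-- ===== SOURCE A (Python) =====
-- from collections import Counter
-- from collections import Counter
--
-- def solution(number, k):
--     answer = ''
--     _dict = Counter(number)
--     keys = sorted(_dict.keys(), reverse=True)
--
--     min_count = 0
--     last = -1
--
--     while min_count < k:
--         if _dict[keys[last]] + min_count >= k:
--             _dict[keys[last]] -= k - min_count
--             min_count += k - min_count
--         else:
--             min_count += _dict[keys[last]]
--             _dict[keys[last]] = 0
--             last -= 1
--
--     result = []
--     for key in keys:
--         for i in range(int(_dict[key])):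
--             result.append(key)
--
--     answer = "".join(result)
--
--     return answer
-- ===== SOURCE B (Python) =====
-- def solution(number, k):
--     # remove the k smallest characters; return the rest in descending order
--     return "".join(sorted(number, reverse=True)[:len(number) - k])
-- ===== Notes on version B (the rewrite author's own statement) =====
-- stated objective: simpler
-- what changed: Replaced the Counter frequency table, descending key sort and count-decrementing while-loop by a single descending sort of the characters followed by a slice keeping the first len(number)-k of them.
import Mathlib
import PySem

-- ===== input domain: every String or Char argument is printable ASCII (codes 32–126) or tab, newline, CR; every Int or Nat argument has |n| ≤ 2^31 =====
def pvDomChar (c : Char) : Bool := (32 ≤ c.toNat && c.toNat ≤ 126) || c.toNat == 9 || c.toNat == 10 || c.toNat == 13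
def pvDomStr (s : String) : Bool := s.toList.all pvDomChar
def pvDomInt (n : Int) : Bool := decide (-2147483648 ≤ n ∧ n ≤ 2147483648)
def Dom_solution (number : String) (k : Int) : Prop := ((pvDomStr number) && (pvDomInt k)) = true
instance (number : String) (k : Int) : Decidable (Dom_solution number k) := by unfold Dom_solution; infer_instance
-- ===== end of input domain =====

-- B replaces A's Counter + bucket-decrement while-loop by one descending sort plus a slice (objective: simpler).

-- ===== PORT A =====
-- A's while-loop: state (dict, min_count, last); fuel is a totality device only —
-- inside Pre_ the loop performs at most keys.length + 1 iterations, so the fuel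
-- supplied below never runs out; 'none' from pyGet? is Python's IndexError (outside Pre_).
def solutionLoop (keys : List Char) (k : Int) (d : PySem.Dict Char Int)
    (minc : Int) (last : Int) : Nat → PySem.Dict Char Int
  | 0 => d
  | fuel + 1 =>
    if minc < k then
      match PySem.List.pyGet? keys last with
      | none => d  -- Python raises IndexError here; excluded by Pre_
      | some key =>
        if d.getD key 0 + minc ≥ k then
          solutionLoop keys k (d.insert key (d.getD key 0 - (k - minc))) (minc + (k - minc)) last fuel
        else
          solutionLoop keys k (d.insert key 0) (minc + d.getD key 0) (last - 1) fuel
    else d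

def solution (number : String) (k : Int) : String :=
  let d := PySem.Dict.counter number.toList
  let keys := PySem.List.sorted d.keys (fun x => x) true
  let d' := solutionLoop keys k d 0 (-1) (keys.length + 2)
  let result := keys.foldl (fun res key => res ++ (PySem.List.pyRange 0 (d'.getD key 0) 1).map (fun _ => key)) []
  String.mk result

-- ===== PORT B =====
def solution_alt (number : String) (k : Int) : String :=
  String.mk (PySem.List.slice (PySem.List.sorted number.toList (fun x => x) true)
    none (some ((number.toList.length : Int) - k)))

-- ===== PRECONDITION & SPEC =====
-- Pre_ excludes exactly the inputs where A raises IndexError: k > len(number).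
def Pre_solution (number : String) (k : Int) : Prop := k ≤ (number.toList.length : Int)
instance (number : String) (k : Int) : Decidable (Pre_solution number k) := by unfold Pre_solution; infer_instance
def pvWitness_solution : String × Int := ("1924", 2)

def Spec_solution (number : String) (k : Int) (out : String) : Prop := out = solution_alt number k
instance (number : String) (k : Int) (out : String) : Decidable (Spec_solution number k out) := by unfold Spec_solution; infer_instance

-- ===== CLAIM (what is proved, stated in full; the proofs are below) =====
def Claim_equal_solution : Prop := ∀ (number : String) (k : Int), Dom_solution number k → Pre_solution number k → Spec_solution number k (solution number k)

-- ===== LEMMAS AND PROOFS =====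

-- helper used only by the proofs: A's while-loop re-read as structural recursion
-- over the reversed key list, with r = k - min_count remaining to remove
def pvAux (ks : List Char) (d : PySem.Dict Char Int) (r : Int) : PySem.Dict Char Int :=
  match ks with
  | [] => d
  | key :: rest =>
    if r ≤ 0 then d
    else if r ≤ d.getD key 0 then d.insert key (d.getD key 0 - r)
    else pvAux rest (d.insert key 0) (r - d.getD key 0)

theorem pvFlatMap_congr {α β : Type} {l : List α} {f g : α → List β}
    (h : ∀ a ∈ l, f a = g a) : l.flatMap f = l.flatMap g := by
  induction l with
  | nil => rfl
  | cons x xs ih =>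
    rw [List.flatMap_cons, List.flatMap_cons, h x (List.mem_cons_self ..),
      ih (fun a ha => h a (List.mem_cons_of_mem _ ha))]

theorem pvPyGet_neg (keys : List Char) (j : Nat) :
    PySem.List.pyGet? keys (-(j:Int)-1) = keys.reverse[j]? := by
  unfold PySem.List.pyGet? PySem.List.pyIdx?
  split_ifs with h1 h2 h3
  · omega
  · omega
  · have hj : j < keys.length := by omega
    have h4 : keys.length - (-(-(j:Int) - 1)).toNat = keys.length - 1 - j := by omega
    rw [h4, List.getElem?_reverse hj]
    rfl
  · have hj : keys.length ≤ j := by omega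
    simp [hj]

theorem pvAux_nil (d : PySem.Dict Char Int) (r : Int) : pvAux [] d r = d := rfl

theorem pvAux_of_nonpos (ks : List Char) (d : PySem.Dict Char Int) {r : Int} (h : r ≤ 0) :
    pvAux ks d r = d := by
  cases ks with
  | nil => rfl
  | cons key rest => simp [pvAux, h]

theorem pvLoop_eq_aux (keys : List Char) (k : Int) :
    ∀ (fuel j : Nat) (d : PySem.Dict Char Int) (minc : Int),
      keys.length - j + 2 ≤ fuel →
      solutionLoop keys k d minc (-(j:Int)-1) fuel = pvAux (keys.reverse.drop j) d (k - minc)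
  | 0, j, d, minc, hf => by omega
  | fuel + 1, j, d, minc, hf => by
    obtain ⟨f', rfl⟩ : ∃ f', fuel = f' + 1 := ⟨fuel - 1, by omega⟩
    rw [solutionLoop]
    by_cases hm : minc < k
    · simp only [if_pos hm, pvPyGet_neg keys j]
      by_cases hj : j < keys.length
      · have hjr : j < keys.reverse.length := by simpa using hj
        rw [List.getElem?_eq_getElem hjr]
        have hdrop : keys.reverse.drop j = keys.reverse[j] :: keys.reverse.drop (j + 1) :=
          List.drop_eq_getElem_cons hjr
        set key := keys.reverse[j] with hkey
        by_cases hge : d.getD key 0 + minc ≥ k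
        · simp only [if_pos hge]
          rw [solutionLoop]
          rw [if_neg (by omega : ¬ minc + (k - minc) < k)]
          rw [hdrop]
          simp only [pvAux]
          rw [if_neg (by omega : ¬ k - minc ≤ 0), if_pos (by omega : k - minc ≤ d.getD key 0)]
        · simp only [if_neg hge]
          have hcast : (-(j:Int)-1) - 1 = -((j+1 : Nat):Int)-1 := by push_cast; ring
          rw [hcast, pvLoop_eq_aux keys k (f' + 1) (j+1) (d.insert key 0) (minc + d.getD key 0)
            (by omega)]
          rw [hdrop]
          simp only [pvAux]
          rw [if_neg (by omega : ¬ k - minc ≤ 0), if_neg (by omega : ¬ k - minc ≤ d.getD key 0)]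
          congr 1
          omega
      · have hnone : keys.reverse[j]? = none := by
          rw [List.getElem?_eq_none_iff]; simpa using (by omega : keys.length ≤ j)
        rw [hnone]
        have hdropnil : keys.reverse.drop j = [] := by
          apply List.drop_eq_nil_of_le; simpa using (by omega : keys.length ≤ j)
        rw [hdropnil, pvAux_nil]
    · rw [if_neg hm, pvAux_of_nonpos _ _ (by omega : k - minc ≤ 0)]

theorem pvAux_getD_of_not_mem (ks : List Char) (d : PySem.Dict Char Int) (r : Int)
    {c : Char} (hc : c ∉ ks) : (pvAux ks d r).getD c 0 = d.getD c 0 := by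
  induction ks generalizing d r with
  | nil => rfl
  | cons key rest ih =>
    simp only [List.mem_cons, not_or] at hc
    simp only [pvAux]
    split_ifs
    · rfl
    · exact PySem.Dict.getD_insert_of_ne d _ _ hc.1
    · rw [ih _ _ hc.2, PySem.Dict.getD_insert_of_ne d _ _ hc.1]

theorem pvFlat_length (ks : List Char) (f : Char → Int) (h : ∀ c ∈ ks, 0 ≤ f c) :
    (ks.flatMap (fun c => List.replicate (f c).toNat c)).length = ((ks.map f).sum).toNat := by
  induction ks with
  | nil => rfl
  | cons key rest ih =>
    have h1 : 0 ≤ f key := h key (List.mem_cons_self ..)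
    have h2 : 0 ≤ (rest.map f).sum :=
      List.sum_nonneg (by intro x hx; obtain ⟨c, hc, rfl⟩ := List.mem_map.mp hx; exact h c (List.mem_cons_of_mem _ hc))
    simp only [List.flatMap_cons, List.length_append, List.length_replicate, List.map_cons,
      List.sum_cons, ih (fun c hc => h c (List.mem_cons_of_mem _ hc))]
    omega

theorem pvAux_spec (ks : List Char) (d : PySem.Dict Char Int) (r : Int)
    (hnd : ks.Nodup) (hnn : ∀ c ∈ ks, 0 ≤ d.getD c 0)
    (hr : r ≤ (ks.map (fun c => d.getD c 0)).sum) :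
    ks.reverse.flatMap (fun c => List.replicate ((pvAux ks d r).getD c 0).toNat c)
      = (ks.reverse.flatMap (fun c => List.replicate (d.getD c 0).toNat c)).take
          (((ks.map (fun c => d.getD c 0)).sum - r).toNat) := by
  induction ks generalizing d r with
  | nil =>
    simp [pvAux]
  | cons key rest ih =>
    have hkey : key ∉ rest := (List.nodup_cons.mp hnd).1
    have hndr : rest.Nodup := (List.nodup_cons.mp hnd).2
    have hc0 : 0 ≤ d.getD key 0 := hnn key (List.mem_cons_self ..)
    have hnnr : ∀ c ∈ rest, 0 ≤ d.getD c 0 := fun c hc => hnn c (List.mem_cons_of_mem _ hc)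
    have hsumr : 0 ≤ (rest.map (fun c => d.getD c 0)).sum :=
      List.sum_nonneg (by intro x hx; obtain ⟨c, hc, rfl⟩ := List.mem_map.mp hx; exact hnnr c hc)
    have hlenr : (rest.reverse.flatMap (fun c => List.replicate (d.getD c 0).toNat c)).length
        = ((rest.map (fun c => d.getD c 0)).sum).toNat := by
      rw [pvFlat_length _ _ (fun c hc => hnnr c (List.mem_reverse.mp hc)),
        List.map_reverse, List.sum_reverse]
    simp only [List.map_cons, List.sum_cons] at hr ⊢
    simp only [List.reverse_cons, List.flatMap_append, List.flatMap_cons, List.flatMap_nil,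
      List.append_nil]
    by_cases hr0 : r ≤ 0
    · rw [pvAux_of_nonpos _ _ hr0]
      rw [List.take_of_length_le]
      rw [List.length_append, List.length_replicate, hlenr]
      omega
    · simp only [pvAux, if_neg hr0]
      by_cases hcr : r ≤ d.getD key 0
      · simp only [if_pos hcr]
        have hflat : rest.reverse.flatMap
            (fun c => List.replicate (((d.insert key (d.getD key 0 - r)).getD c 0)).toNat c)
            = rest.reverse.flatMap (fun c => List.replicate ((d.getD c 0)).toNat c) := by
          apply pvFlatMap_congr
          intro c hc
          rw [PySem.Dict.getD_insert_of_ne d _ _ (by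
            intro h; exact hkey (h ▸ List.mem_reverse.mp hc))]
        rw [hflat, PySem.Dict.getD_insert_self]
        rw [List.take_append, List.take_of_length_le (by rw [hlenr]; omega), hlenr,
          List.take_replicate]
        congr 2
        omega
      · simp only [if_neg hcr]
        have hgd : ∀ c ∈ rest, (d.insert key 0).getD c 0 = d.getD c 0 := by
          intro c hc
          exact PySem.Dict.getD_insert_of_ne d _ _ (by rintro rfl; exact hkey hc)
        have hmapeq : rest.map (fun c => (d.insert key 0).getD c 0)
            = rest.map (fun c => d.getD c 0) :=
          List.map_congr_left hgd
        have hkeyfin : (pvAux rest (d.insert key 0) (r - d.getD key 0)).getD key 0 = 0 := by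
          rw [pvAux_getD_of_not_mem _ _ _ hkey, PySem.Dict.getD_insert_self]
        have ihr := ih (d.insert key 0) (r - d.getD key 0) hndr
          (by intro c hc; rw [hgd c hc]; exact hnnr c hc)
          (by rw [hmapeq]; omega)
        have hflat2 : rest.reverse.flatMap
            (fun c => List.replicate ((d.insert key 0).getD c 0).toNat c)
            = rest.reverse.flatMap (fun c => List.replicate (d.getD c 0).toNat c) := by
          apply pvFlatMap_congr
          intro c hc
          rw [hgd c (List.mem_reverse.mp hc)]
        rw [ihr, hkeyfin]
        simp only [Int.toNat_zero, List.replicate_zero, List.append_nil]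
        rw [hmapeq, hflat2]
        rw [List.take_append, hlenr]
        rw [(by omega : (d.getD key 0 + (rest.map (fun c => d.getD c 0)).sum - r).toNat
              = ((rest.map (fun c => d.getD c 0)).sum - (r - d.getD key 0)).toNat)]
        rw [(by omega : (((rest.map (fun c => d.getD c 0)).sum - (r - d.getD key 0)).toNat
              - ((rest.map (fun c => d.getD c 0)).sum).toNat) = 0)]
        simp

theorem pvCount_flatMap_replicate (ks : List Char) (f : Char → Nat) (x : Char) (hnd : ks.Nodup) :
    (ks.flatMap (fun c => List.replicate (f c) c)).count x = if x ∈ ks then f x else 0 := by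
  induction ks with
  | nil => simp
  | cons key rest ih =>
    have hkey : key ∉ rest := (List.nodup_cons.mp hnd).1
    rw [List.flatMap_cons, List.count_append, List.count_replicate,
      ih (List.nodup_cons.mp hnd).2]
    by_cases hx : x = key
    · subst hx
      simp [hkey]
    · simp [hx, Ne.symm hx]

theorem pvFlat_perm (s : List Char) (ks : List Char) (hnd : ks.Nodup)
    (hmem : ∀ x ∈ s, x ∈ ks) :
    (ks.flatMap (fun c => List.replicate (s.count c) c)).Perm s := by
  rw [List.perm_iff_count]
  intro a
  rw [pvCount_flatMap_replicate ks _ a hnd]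
  by_cases ha : a ∈ ks
  · simp [ha]
  · simp only [if_neg ha]
    symm
    rw [List.count_eq_zero]
    intro hmem2
    exact ha (hmem a hmem2)

theorem pvFlat_pairwise (ks : List Char) (f : Char → Nat)
    (h : ks.Pairwise (fun a b => b ≤ a)) :
    (ks.flatMap (fun c => List.replicate (f c) c)).Pairwise (fun a b => b ≤ a) := by
  induction ks with
  | nil => simp
  | cons key rest ih =>
    rw [List.flatMap_cons, List.pairwise_append]
    refine ⟨by rw [List.pairwise_replicate]; right; exact le_rfl,
      ih (List.pairwise_cons.mp h).2, ?_⟩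
    intro a ha b hb
    rw [List.eq_of_mem_replicate ha]
    obtain ⟨c, hc, hbc⟩ := List.mem_flatMap.mp hb
    rw [List.eq_of_mem_replicate hbc]
    exact (List.pairwise_cons.mp h).1 c hc

theorem pvSorted_rev_eq_flat (s : List Char) :
    PySem.List.sorted s (fun x => x) true
      = (PySem.List.sorted (PySem.Set.ofList s) (fun x => x) true).flatMap
          (fun c => List.replicate (s.count c) c) := by
  set ks := PySem.List.sorted (PySem.Set.ofList s) (fun x => x) true with hks
  have hndks : ks.Nodup :=
    ((PySem.List.sorted_perm (PySem.Set.ofList s) (fun x => x) true).nodup_iff).mpr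
      (PySem.Set.nodup_ofList s)
  have hmem : ∀ x ∈ s, x ∈ ks := by
    intro x hx
    rw [hks, PySem.List.mem_sorted]
    exact (PySem.Set.mem_ofList s x).mpr hx
  have hperm : (ks.flatMap (fun c => List.replicate (s.count c) c)).Perm s :=
    pvFlat_perm s ks hndks hmem
  refine List.Perm.eq_of_pairwise (le := fun a b => b ≤ a) ?_ ?_ ?_ ?_
  · intro a b _ _ h1 h2; exact le_antisymm h2 h1
  · exact PySem.List.sorted_pairwise_rev _ _
  · exact pvFlat_pairwise ks _
      (by simpa using PySem.List.sorted_pairwise_rev (PySem.Set.ofList s) (fun x : Char => x))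
  · exact (PySem.List.sorted_perm s (fun x => x) true).trans hperm.symm

theorem pvRange_map_const (c : Int) (key : Char) :
    (PySem.List.pyRange 0 c 1).map (fun _ => key) = List.replicate c.toNat key := by
  have hlen : (PySem.List.pyRange 0 c 1).length = c.toNat := by
    rw [PySem.List.pyRange_of_pos _ _ (by norm_num)]
    by_cases h : (0:Int) < c
    · simp only [List.length_map, List.length_range, if_pos h]
      omega
    · simp only [List.length_map, List.length_range, if_neg h]
      omega
  rw [← hlen]
  exact List.map_const'

-- ===== VERDICT (by name: the statement is the Claim_ definition above) =====
theorem solution_spec : Claim_equal_solution := by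
  intro number k _hdom hpre
  unfold Spec_solution solution solution_alt
  dsimp only
  set s := number.toList with hs
  set d := PySem.Dict.counter s with hd
  have hkeys : d.keys = PySem.Set.ofList s := PySem.Dict.keys_counter s
  set ks := PySem.List.sorted d.keys (fun x => x) true with hksdef
  have hks : ks = PySem.List.sorted (PySem.Set.ofList s) (fun x => x) true := by
    rw [hksdef, hkeys]
  have hndks : ks.Nodup := by
    rw [hks]
    exact ((PySem.List.sorted_perm (PySem.Set.ofList s) (fun x => x) true).nodup_iff).mpr
      (PySem.Set.nodup_ofList s)
  have hgetD : ∀ c, d.getD c 0 = (s.count c : Int) := fun c => PySem.Dict.getD_counter s c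
  -- the while loop computes pvAux over the reversed key list
  have hloop : solutionLoop ks k d 0 (-1) (ks.length + 2) = pvAux ks.reverse d k := by
    have h0 := pvLoop_eq_aux ks k (ks.length + 2) 0 d 0 (by omega)
    simp only [Nat.cast_zero, neg_zero, zero_sub, List.drop_zero, sub_zero] at h0
    exact h0
  rw [hloop]
  -- the result-building loop is a flatMap of replicates
  rw [PySem.List.foldl_append_eq_flatMap, List.nil_append]
  have hrepl : ks.flatMap
      (fun key => (PySem.List.pyRange 0 ((pvAux ks.reverse d k).getD key 0) 1).map (fun _ => key))
      = ks.flatMap (fun key => List.replicate ((pvAux ks.reverse d k).getD key 0).toNat key) :=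
    pvFlatMap_congr (fun c _ => pvRange_map_const _ c)
  rw [hrepl]
  -- apply the loop characterisation
  have hndrev : ks.reverse.Nodup := List.nodup_reverse.mpr hndks
  have hnn : ∀ c ∈ ks.reverse, 0 ≤ d.getD c 0 := by
    intro c _
    rw [hgetD]
    exact_mod_cast Nat.zero_le _
  have hsum : (ks.reverse.map (fun c => d.getD c 0)).sum = (s.length : Int) := by
    have hlen := pvFlat_length ks.reverse (fun c => d.getD c 0) hnn
    have hperm : (ks.reverse.flatMap (fun c => List.replicate (s.count c) c)).Perm s := by
      apply pvFlat_perm s _ hndrev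
      intro x hx
      rw [List.mem_reverse, hks, PySem.List.mem_sorted]
      exact (PySem.Set.mem_ofList s x).mpr hx
    have heq : ks.reverse.flatMap (fun c => List.replicate ((d.getD c 0)).toNat c)
        = ks.reverse.flatMap (fun c => List.replicate (s.count c) c) :=
      pvFlatMap_congr (fun c _ => by rw [hgetD, Int.toNat_natCast])
    rw [heq, hperm.length_eq] at hlen
    have hnni : 0 ≤ (ks.reverse.map (fun c => d.getD c 0)).sum :=
      List.sum_nonneg (by intro x hx; obtain ⟨c, hc, rfl⟩ := List.mem_map.mp hx; exact hnn c hc)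
    omega
  have hspec := pvAux_spec ks.reverse d k hndrev hnn (by rw [hsum]; exact hpre)
  rw [List.reverse_reverse] at hspec
  rw [hspec, hsum]
  -- identify the base flat list with the descending sort of s
  have hflat : ks.flatMap (fun c => List.replicate (d.getD c 0).toNat c)
      = PySem.List.sorted s (fun x => x) true := by
    rw [pvSorted_rev_eq_flat s, ← hks]
    exact pvFlatMap_congr (fun c _ => by rw [hgetD, Int.toNat_natCast])
  rw [hflat]
  -- B's slice is the same take
  rw [PySem.List.slice_to _ (by unfold Pre_solution at hpre; rw [← hs] at hpre; omega : (0:Int) ≤ ((s.length : Int) - k))]
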